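-- pv_equiv track=rewrite | github.com/arshutk/sorting-visualizer | QuickSort.py | get_clrd_data
-- ===== SOURCE A (Python) =====
-- def get_clrd_data(data_len, start, end, border, crnt_index, is_swaping=False):
--     clrd_data = []
--     for counter in range(data_len):
--         # base colouring
--         if counter >= start and counter <= end:
--             clrd_data.append("#808080")
--         else:
--             clrd_data.append("#E0E0E0")
--
--         if counter == end:
--             clrd_data[counter] = "#3366FF"
--         elif counter == border:
--             clrd_data[counter] = "#FF0033"
--         elif counter == crnt_index:
--             clrd_data[counter] = "#FFCC33"
--
--         if is_swaping:
--             if counter == border or counter == crnt_index: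
--                 clrd_data[counter] == "green"
--
--     return clrd_data
-- ===== SOURCE B (Python) =====
-- def get_clrd_data(data_len, start, end, border, crnt_index, is_swaping=False):
--     # Run-length construction: the output is a concatenation of constant runs of the
--     # two base colours, interrupted at the (sorted) in-range special indices.
--     def run(a, b):
--         # base colours for indices a..b-1, emitted as up to three constant runs
--         lo = max(a, start)
--         hi = min(b, end + 1)
--         if lo < hi:
--             return (['#E0E0E0'] * (lo - a)
--                     + ['#808080'] * (hi - lo)
--                     + ['#E0E0E0'] * (b - hi))
--         return ['#E0E0E0'] * (b - a)
--
--     specials = []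
--     for idx, c in ((end, '#3366FF'), (border, '#FF0033'), (crnt_index, '#FFCC33')):
--         if 0 <= idx < data_len and all(idx != j for j, _ in specials):
--             specials.append((idx, c))
--     specials.sort(key=lambda p: p[0])
--
--     out = []
--     prev = 0
--     for idx, c in specials:
--         out += run(prev, idx)
--         out.append(c)
--         prev = idx + 1
--     out += run(prev, data_len)
--     return out
-- ===== Notes on version B (the rewrite author's own statement) =====
-- stated objective: faster
-- what changed: Replaces the per-element loop (append base colour then conditionally overwrite each index) by a run-length construction: it collects the in-range special indices, sorts them, and emits the list as a concatenation of constant replicate-runs of the base colours interleaved with the special colours, so no per-index conditional is evaluated; the no-op '==' swap block is dropped.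
import Mathlib
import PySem

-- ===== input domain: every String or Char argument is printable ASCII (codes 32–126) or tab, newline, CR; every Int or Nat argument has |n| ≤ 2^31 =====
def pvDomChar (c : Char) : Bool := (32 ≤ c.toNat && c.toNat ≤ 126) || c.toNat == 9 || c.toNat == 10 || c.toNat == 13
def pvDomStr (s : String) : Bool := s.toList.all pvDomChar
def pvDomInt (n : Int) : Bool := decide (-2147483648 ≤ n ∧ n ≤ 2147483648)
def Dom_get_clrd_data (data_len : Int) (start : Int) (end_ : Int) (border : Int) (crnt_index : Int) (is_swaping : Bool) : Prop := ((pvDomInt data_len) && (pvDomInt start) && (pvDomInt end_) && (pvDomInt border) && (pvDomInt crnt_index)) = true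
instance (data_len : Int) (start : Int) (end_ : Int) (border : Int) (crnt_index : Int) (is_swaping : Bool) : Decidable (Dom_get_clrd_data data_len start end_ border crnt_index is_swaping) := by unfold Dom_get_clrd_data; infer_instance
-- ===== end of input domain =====

-- B replaces A's per-element append-then-overwrite loop (and its no-op '==' swap block)
-- by a run-length construction: sorted in-range special indices interleaved with
-- constant replicate-runs of the two base colours (no per-index conditional); objective:
-- faster (measured: constant-factor, list-replication vs per-element work).

-- ===== PORT A =====
-- literal transliteration of A's loop: append base colour, then the elif overwrite chain
-- at index 'counter'; the 'is_swaping' block only evaluates a comparison ('==', no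
-- assignment) in Python, so it changes no state and is ported as the identity on state.
def get_clrd_data (data_len : Int) (start : Int) (end_ : Int) (border : Int) (crnt_index : Int) (is_swaping : Bool) : List String :=
  (PySem.List.pyRange 0 data_len 1).foldl (fun clrd_data counter =>
    let clrd_data := clrd_data ++ [if start ≤ counter ∧ counter ≤ end_ then "#808080" else "#E0E0E0"]
    if counter = end_ then clrd_data.set counter.toNat "#3366FF"
    else if counter = border then clrd_data.set counter.toNat "#FF0033"
    else if counter = crnt_index then clrd_data.set counter.toNat "#FFCC33"
    else clrd_data) []

-- ===== PORT B =====
-- Source B's helper run(a, b): the base colours for indices a..b-1 as constant runs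
def pvRun (start end_ a b : Int) : List String :=
  let lo := max a start
  let hi := min b (end_ + 1)
  if lo < hi then
    PySem.List.pyRepeat ["#E0E0E0"] (lo - a) ++ PySem.List.pyRepeat ["#808080"] (hi - lo)
      ++ PySem.List.pyRepeat ["#E0E0E0"] (b - hi)
  else PySem.List.pyRepeat ["#E0E0E0"] (b - a)

def get_clrd_data_alt (data_len : Int) (start : Int) (end_ : Int) (border : Int) (crnt_index : Int) (is_swaping : Bool) : List String :=
  let specials := [((end_ : Int), "#3366FF"), (border, "#FF0033"), (crnt_index, "#FFCC33")].foldl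
    (fun (acc : List (Int × String)) p =>
      if 0 ≤ p.1 ∧ p.1 < data_len ∧ ∀ q ∈ acc, p.1 ≠ q.1 then acc ++ [p] else acc) []
  let specials := PySem.List.sorted specials (fun p => p.1) false
  let st := specials.foldl (fun (st : List String × Int) p =>
      (st.1 ++ pvRun start end_ st.2 p.1 ++ [p.2], p.1 + 1)) ([], 0)
  st.1 ++ pvRun start end_ st.2 data_len

-- ===== PRECONDITION & SPEC =====
def Spec_get_clrd_data (data_len : Int) (start : Int) (end_ : Int) (border : Int) (crnt_index : Int) (is_swaping : Bool) (out : List String) : Prop := out = get_clrd_data_alt data_len start end_ border crnt_index is_swaping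
instance (data_len : Int) (start : Int) (end_ : Int) (border : Int) (crnt_index : Int) (is_swaping : Bool) (out : List String) : Decidable (Spec_get_clrd_data data_len start end_ border crnt_index is_swaping out) := by unfold Spec_get_clrd_data; infer_instance

-- ===== CLAIM (what is proved, stated in full; the proofs are below) =====
def Claim_equal_get_clrd_data : Prop := ∀ (data_len : Int) (start : Int) (end_ : Int) (border : Int) (crnt_index : Int) (is_swaping : Bool), Dom_get_clrd_data data_len start end_ border crnt_index is_swaping → Spec_get_clrd_data data_len start end_ border crnt_index is_swaping (get_clrd_data data_len start end_ border crnt_index is_swaping)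

-- ===== LEMMAS AND PROOFS =====

-- the colour both programs assign to index i
def pvColor (start end_ border crnt_index i : Int) : String :=
  if i = end_ then "#3366FF"
  else if i = border then "#FF0033"
  else if i = crnt_index then "#FFCC33"
  else if start ≤ i ∧ i ≤ end_ then "#808080" else "#E0E0E0"

-- the base colour (before the special overrides)
def pvBase (start end_ i : Int) : String :=
  if start ≤ i ∧ i ≤ end_ then "#808080" else "#E0E0E0"

-- A's loop body, named for the proofs
def pvStepA (start end_ border crnt_index : Int) (clrd_data : List String) (counter : Int) : List String :=
  let clrd_data := clrd_data ++ [if start ≤ counter ∧ counter ≤ end_ then "#808080" else "#E0E0E0"]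
  if counter = end_ then clrd_data.set counter.toNat "#3366FF"
  else if counter = border then clrd_data.set counter.toNat "#FF0033"
  else if counter = crnt_index then clrd_data.set counter.toNat "#FFCC33"
  else clrd_data

theorem set_append_singleton {α : Type} (l : List α) (x v : α) :
    (l ++ [x]).set l.length v = l ++ [v] := by
  induction l with
  | nil => simp
  | cons a t ih => simp [ih]

theorem a_loop (start end_ border crnt_index : Int) (n : Nat) :
    ((List.range n).map (fun (k : Nat) => (k : Int))).foldl (pvStepA start end_ border crnt_index) []
      = (List.range n).map (fun (k : Nat) => pvColor start end_ border crnt_index (k : Int)) := by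
  induction n with
  | zero => simp
  | succ n ih =>
    rw [List.range_succ]
    simp only [List.map_append, List.foldl_append, ih, List.map_cons, List.map_nil,
      List.foldl_cons, List.foldl_nil]
    have hlen : ((List.range n).map (fun (k : Nat) => pvColor start end_ border crnt_index (k : Int))).length = n := by
      simp
    have htn : ((n : Int)).toNat = n := by simp
    unfold pvStepA pvColor
    by_cases h1 : (n : Int) = end_ <;> by_cases h2 : (n : Int) = border <;>
      by_cases h3 : (n : Int) = crnt_index <;>
      simp only [h1, h2, h3, if_pos, if_neg, htn, not_false_iff] <;>
      first
        | (rw [← hlen, set_append_singleton] <;> simp_all)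
        | simp_all

theorem a_eq_map (data_len start end_ border crnt_index : Int) (is_swaping : Bool) :
    get_clrd_data data_len start end_ border crnt_index is_swaping
      = (PySem.List.pyRange 0 data_len 1).map (pvColor start end_ border crnt_index) := by
  show (PySem.List.pyRange 0 data_len 1).foldl (pvStepA start end_ border crnt_index) []
      = (PySem.List.pyRange 0 data_len 1).map (pvColor start end_ border crnt_index)
  rw [PySem.List.pyRange_one]
  simp only [zero_add, sub_zero, List.map_map]
  rw [a_loop]
  simp

-- a constant map over a range is a replicate-run
theorem map_const_pyRange (a b : Int) (f : Int → String) (c : String)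
    (h : ∀ i, a ≤ i → i < b → f i = c) :
    (PySem.List.pyRange a b 1).map f = List.replicate (b - a).toNat c := by
  apply List.eq_replicate_iff.mpr
  constructor
  · simp [PySem.List.length_pyRange_one]
  · intro x hx
    obtain ⟨i, hi, rfl⟩ := List.mem_map.mp hx
    exact h i (PySem.List.mem_pyRange_one.mp hi).1 (PySem.List.mem_pyRange_one.mp hi).2

-- Source B's run(a, b) produces exactly the base colours of the indices a..b-1
theorem run_eq_map (start end_ a b : Int) :
    pvRun start end_ a b = (PySem.List.pyRange a b 1).map (pvBase start end_) := by
  unfold pvRun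
  simp only [PySem.List.pyRepeat_singleton]
  by_cases h : max a start < min b (end_ + 1)
  · rw [if_pos h]
    rw [PySem.List.pyRange_one_append a (max a start) b (by omega) (by omega),
        PySem.List.pyRange_one_append (max a start) (min b (end_ + 1)) b (by omega) (by omega),
        List.map_append, List.map_append]
    rw [map_const_pyRange _ _ _ "#E0E0E0" (fun i h1 h2 => by unfold pvBase; rw [if_neg]; omega),
        map_const_pyRange _ _ _ "#808080" (fun i h1 h2 => by unfold pvBase; rw [if_pos]; omega),
        map_const_pyRange _ _ _ "#E0E0E0" (fun i h1 h2 => by unfold pvBase; rw [if_neg]; omega)]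
    simp [List.append_assoc]
  · rw [if_neg h]
    rw [map_const_pyRange _ _ _ "#E0E0E0" (fun i h1 h2 => by unfold pvBase; rw [if_neg]; omega)]

-- assembling sorted special indices with base runs yields the pointwise colouring
theorem assemble (data_len start end_ border crnt_index : Int) (S : List (Int × String)) :
    ∀ (acc : List String) (prev : Int),
    S.Pairwise (fun p q => p.1 < q.1) →
    (∀ p ∈ S, prev ≤ p.1 ∧ p.1 < data_len ∧ p.2 = pvColor start end_ border crnt_index p.1) →
    (∀ j, prev ≤ j → j < data_len → (∃ p ∈ S, p.1 = j) ∨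
        pvColor start end_ border crnt_index j = pvBase start end_ j) →
    (S.foldl (fun (st : List String × Int) p =>
        (st.1 ++ pvRun start end_ st.2 p.1 ++ [p.2], p.1 + 1)) (acc, prev)).1
      ++ pvRun start end_
          (S.foldl (fun (st : List String × Int) p =>
            (st.1 ++ pvRun start end_ st.2 p.1 ++ [p.2], p.1 + 1)) (acc, prev)).2 data_len
      = acc ++ (PySem.List.pyRange prev data_len 1).map (pvColor start end_ border crnt_index) := by
  induction S with
  | nil =>
    intro acc prev _ _ h4
    simp only [List.foldl_nil]
    rw [run_eq_map]
    congr 1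
    apply List.map_congr_left
    intro i hi
    obtain ⟨h1, h2⟩ := PySem.List.mem_pyRange_one.mp hi
    rcases h4 i h1 h2 with ⟨p, hp, _⟩ | heq
    · exact absurd hp (List.not_mem_nil)
    · exact heq.symm
  | cons p T ih =>
    intro acc prev hpair h3 h4
    obtain ⟨hp1, hp2, hp3⟩ := h3 p (List.mem_cons_self)
    simp only [List.foldl_cons]
    rw [ih (acc ++ pvRun start end_ prev p.1 ++ [p.2]) (p.1 + 1)
        (List.Pairwise.of_cons hpair)
        (fun q hq => ⟨by
            have := (List.pairwise_cons.mp hpair).1 q hq; omega,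
          (h3 q (List.mem_cons_of_mem _ hq)).2.1,
          (h3 q (List.mem_cons_of_mem _ hq)).2.2⟩)
        (fun j hj1 hj2 => by
          rcases h4 j (by omega) hj2 with ⟨q, hq, hqj⟩ | heq
          · rcases List.mem_cons.mp hq with rfl | hq'
            · omega
            · exact Or.inl ⟨q, hq', hqj⟩
          · exact Or.inr heq)]
    rw [run_eq_map]
    rw [PySem.List.pyRange_one_append prev p.1 data_len (by omega) (by omega),
        PySem.List.pyRange_one_cons (show p.1 < data_len by omega)]
    have hbase : (PySem.List.pyRange prev p.1 1).map (pvColor start end_ border crnt_index)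
        = (PySem.List.pyRange prev p.1 1).map (pvBase start end_) := by
      apply List.map_congr_left
      intro j hj
      obtain ⟨h1, h2⟩ := PySem.List.mem_pyRange_one.mp hj
      rcases h4 j h1 (by omega) with ⟨q, hq, hqj⟩ | heq
      · rcases List.mem_cons.mp hq with rfl | hq'
        · omega
        · have := (List.pairwise_cons.mp hpair).1 q hq'; omega
      · exact heq
    simp only [List.map_append, List.map_cons, hbase, ← hp3]
    simp [List.append_assoc]

-- keys of the specials list are distinct; every entry is in range and carries its pvColor;
-- every in-range special index occurs as a key
theorem specials_props (data_len start end_ border crnt_index : Int) :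
    ∀ S, S = [((end_ : Int), "#3366FF"), (border, "#FF0033"), (crnt_index, "#FFCC33")].foldl
      (fun (acc : List (Int × String)) p =>
        if 0 ≤ p.1 ∧ p.1 < data_len ∧ ∀ q ∈ acc, p.1 ≠ q.1 then acc ++ [p] else acc) [] →
    (S.map Prod.fst).Nodup ∧
    (∀ p ∈ S, 0 ≤ p.1 ∧ p.1 < data_len ∧ p.2 = pvColor start end_ border crnt_index p.1) ∧
    (∀ j, 0 ≤ j → j < data_len → (∃ p ∈ S, p.1 = j) ∨
        pvColor start end_ border crnt_index j = pvBase start end_ j) := by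
  intro S hS
  simp only [List.foldl_cons, List.foldl_nil] at hS
  split_ifs at hS with h1 h2 h3 h4 h5 h6 h7
  all_goals subst hS
  all_goals
    simp only [List.mem_append, List.mem_cons, List.mem_singleton, List.not_mem_nil,
      List.nil_append, List.cons_append, List.map_append, List.map_cons, List.map_nil,
      forall_eq, forall_eq_or_imp, false_or, or_false, ne_eq, false_implies, implies_true,
      true_and, and_true] at *
  all_goals repeat' apply And.intro
  -- coverage goals (the only ∀-over-Int goals): case split on which special j equals
  all_goals try
    (intro j hj1 hj2
     by_cases j1 : j = end_ <;> by_cases j2 : j = border <;> by_cases j3 : j = crnt_index <;>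
       first
         | (left
            simp only [List.mem_append, List.mem_cons, List.mem_singleton, List.not_mem_nil,
              List.nil_append, List.cons_append, exists_eq_or_imp, exists_eq_left, false_or,
              or_false, false_and, exists_false]
            omega)
         | (right; try unfold pvColor; try unfold pvBase; split_ifs <;> first | rfl | omega)
         | (exfalso; omega))
  -- nodup goals
  all_goals try ((simp only [List.nodup_cons, List.mem_cons, List.mem_singleton,
      List.not_mem_nil, List.nodup_nil, List.nodup_singleton, not_or, and_true, not_false_iff,
      true_and]) <;> (first | omega | trivial))
  all_goals try trivial
  all_goals try exact List.nodup_nil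
  -- membership goals: bounds by omega, colours by unfolding pvColor
  all_goals first
    | omega
    | (unfold pvColor; split_ifs <;> first | rfl | omega)

-- B computes the same pointwise colouring
theorem b_eq_map (data_len start end_ border crnt_index : Int) (is_swaping : Bool) :
    get_clrd_data_alt data_len start end_ border crnt_index is_swaping
      = (PySem.List.pyRange 0 data_len 1).map (pvColor start end_ border crnt_index) := by
  unfold get_clrd_data_alt
  obtain ⟨hnd, hmem, hcov⟩ := specials_props data_len start end_ border crnt_index _ rfl
  set S0 := [((end_ : Int), "#3366FF"), (border, "#FF0033"), (crnt_index, "#FFCC33")].foldl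
      (fun (acc : List (Int × String)) p =>
        if 0 ≤ p.1 ∧ p.1 < data_len ∧ ∀ q ∈ acc, p.1 ≠ q.1 then acc ++ [p] else acc) [] with hS0
  have hperm : (PySem.List.sorted S0 (fun p => p.1) false).Perm S0 := PySem.List.sorted_perm _ _ _
  have hpair : (PySem.List.sorted S0 (fun p => p.1) false).Pairwise (fun p q => p.1 < q.1) := by
    have h1 : (PySem.List.sorted S0 (fun p => p.1) false).Pairwise (fun p q => p.1 ≤ q.1) :=
      PySem.List.sorted_pairwise _ _
    have h2 : ((PySem.List.sorted S0 (fun p => p.1) false).map Prod.fst).Nodup :=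
      (hperm.map Prod.fst).nodup_iff.mpr hnd
    have h3 : (PySem.List.sorted S0 (fun p => p.1) false).Pairwise (fun p q => p.1 ≠ q.1) :=
      List.pairwise_map.mp h2
    exact (h1.and h3).imp (fun h => lt_of_le_of_ne h.1 h.2)
  have := assemble data_len start end_ border crnt_index
      (PySem.List.sorted S0 (fun p => p.1) false) [] 0
      hpair
      (fun p hp => hmem p (hperm.mem_iff.mp hp))
      (fun j hj1 hj2 => by
        rcases hcov j hj1 hj2 with ⟨p, hp, hpj⟩ | heq
        · exact Or.inl ⟨p, hperm.mem_iff.mpr hp, hpj⟩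
        · exact Or.inr heq)
  simpa using this

-- ===== VERDICT (by name: the statement is the Claim_ definition above) =====
theorem get_clrd_data_spec : Claim_equal_get_clrd_data := by
  intro data_len start end_ border crnt_index is_swaping _
  unfold Spec_get_clrd_data
  rw [a_eq_map, b_eq_map]
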